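-- pv_equiv track=rewrite | github.com/sszokoly/showFLOW | src/build.py | extract_marker_indexes
-- ===== SOURCE A (Python) =====
-- def extract_marker_indexes(marker_name, content):
--     marker_name = marker_name.upper()
--     start_marker = f"### BEGIN {marker_name}"
--     end_marker = f"### END {marker_name} "
--
--     lines = content.splitlines()
--     start_lines = [x for x in range(len(lines)) if start_marker in lines[x]]
--     end_lines = [x for x in range(len(lines)) if end_marker in lines[x]]
--
--     if start_lines and end_lines:
--         return start_lines[0], end_lines[0]
--     return -1, -1
-- ===== SOURCE B (Python) =====
-- def extract_marker_indexes(marker_name, content):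
--     marker_name = marker_name.upper()
--     start_marker = f"### BEGIN {marker_name}"
--     end_marker = f"### END {marker_name} "
--     start_idx = end_idx = -1
--     for i, line in enumerate(content.splitlines()):
--         if start_idx < 0 and start_marker in line:
--             start_idx = i
--         if end_idx < 0 and end_marker in line:
--             end_idx = i
--         if start_idx >= 0 and end_idx >= 0:
--             break
--     if start_idx >= 0 and end_idx >= 0:
--         return start_idx, end_idx
--     return -1, -1
-- ===== Notes on version B (the rewrite author's own statement) =====
-- stated objective: alternative
-- what changed: Replaces the two full index-range comprehensions over all lines by a single pass over the lines that records the first occurrence of each marker and breaks as soon as both are found.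
import Mathlib
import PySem

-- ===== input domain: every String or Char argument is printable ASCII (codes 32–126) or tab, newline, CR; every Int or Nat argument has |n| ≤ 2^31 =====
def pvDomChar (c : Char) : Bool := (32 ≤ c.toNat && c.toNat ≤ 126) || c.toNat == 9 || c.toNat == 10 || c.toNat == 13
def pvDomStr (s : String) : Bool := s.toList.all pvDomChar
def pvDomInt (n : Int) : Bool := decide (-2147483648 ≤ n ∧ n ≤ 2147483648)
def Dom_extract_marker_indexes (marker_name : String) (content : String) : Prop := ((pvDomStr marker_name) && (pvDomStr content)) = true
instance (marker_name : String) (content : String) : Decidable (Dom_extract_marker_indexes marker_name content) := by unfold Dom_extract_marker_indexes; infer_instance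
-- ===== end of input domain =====

-- B replaces A's two full index-range scans by a single pass over the lines with an early break (alternative decomposition, same asymptotic cost); return value only.

-- ===== PORT A =====
def extract_marker_indexes (marker_name : String) (content : String) : Int × Int :=
  let m := PySem.Str.upper marker_name
  let start_marker := "### BEGIN " ++ m
  let end_marker := "### END " ++ m ++ " "
  let lines := PySem.Str.splitlines content
  let start_lines := (PySem.List.pyRange 0 (PySem.List.len lines) 1).filter
      (fun x => PySem.Str.isIn start_marker (PySem.List.pyGetD lines x ""))
  let end_lines := (PySem.List.pyRange 0 (PySem.List.len lines) 1).filter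
      (fun x => PySem.Str.isIn end_marker (PySem.List.pyGetD lines x ""))
  if !start_lines.isEmpty && !end_lines.isEmpty then
    (PySem.List.pyGetD start_lines 0 0, PySem.List.pyGetD end_lines 0 0)
  else (-1, -1)

-- ===== PORT B =====
-- the for-loop of Source B: record the first index of each marker, break once both are set
def emiLoop (sm em : String) (ls : List String) (i s e : Int) : Int × Int :=
  match ls with
  | [] => if 0 ≤ s ∧ 0 ≤ e then (s, e) else (-1, -1)
  | l :: rest =>
    let s := if s < 0 ∧ PySem.Str.isIn sm l then i else s
    let e := if e < 0 ∧ PySem.Str.isIn em l then i else e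
    if 0 ≤ s ∧ 0 ≤ e then (s, e) else emiLoop sm em rest (i + 1) s e

def extract_marker_indexes_alt (marker_name : String) (content : String) : Int × Int :=
  let m := PySem.Str.upper marker_name
  let start_marker := "### BEGIN " ++ m
  let end_marker := "### END " ++ m ++ " "
  emiLoop start_marker end_marker (PySem.Str.splitlines content) 0 (-1) (-1)

-- ===== PRECONDITION & SPEC =====
def Spec_extract_marker_indexes (marker_name : String) (content : String) (out : Int × Int) : Prop := out = extract_marker_indexes_alt marker_name content
instance (marker_name : String) (content : String) (out : Int × Int) : Decidable (Spec_extract_marker_indexes marker_name content out) := by unfold Spec_extract_marker_indexes; infer_instance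

-- ===== CLAIM (what is proved, stated in full; the proofs are below) =====
def Claim_equal_extract_marker_indexes : Prop := ∀ (marker_name : String) (content : String), Dom_extract_marker_indexes marker_name content → Spec_extract_marker_indexes marker_name content (extract_marker_indexes marker_name content)

-- ===== LEMMAS AND PROOFS =====

theorem emiLoop_eq (sm em : String) (ls : List String) : ∀ (i : Int), 0 ≤ i → ∀ (s e : Int),
    emiLoop sm em ls i s e =
      match (if 0 ≤ s then some s else (ls.findIdx? (fun l => PySem.Str.isIn sm l)).map (fun j => i + (j : Int))),
            (if 0 ≤ e then some e else (ls.findIdx? (fun l => PySem.Str.isIn em l)).map (fun j => i + (j : Int))) with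
      | some a, some b => (a, b)
      | _, _ => (-1, -1) := by
  induction ls with
  | nil =>
    intro i hi s e
    simp only [emiLoop, List.findIdx?_nil]
    by_cases hs : 0 ≤ s <;> by_cases he : 0 ≤ e <;> simp [hs, he]
  | cons l rest ih =>
    intro i hi s e
    have hmap : ∀ (o : Option Nat), (o.map (fun j => ((j:Nat)+1))).map (fun j => i + (j : Int)) = o.map (fun j => (i+1) + (j : Int)) := by
      intro o; cases o <;> simp <;> push_cast <;> ring
    simp only [emiLoop, List.findIdx?_cons]
    rw [ih (i+1) (by omega)]
    by_cases hsl : PySem.Str.isIn sm l <;> by_cases hel : PySem.Str.isIn em l <;>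
      simp only [hsl, hel, and_true, if_true] <;>
      split_ifs <;>
        first
          | omega
          | rfl
          | (rw [Option.map_map]; rfl)
          | exact (‹_ ∧ False›.2).elim
          | exact absurd (‹_ ∧ false = true›.2) (by decide)
          | contradiction
          | (simp; done)
          | (rcases hA : List.findIdx? (fun l => PySem.Chars.isIn sm.toList l.toList) rest with _ | a <;>
             rcases hB : List.findIdx? (fun l => PySem.Chars.isIn em.toList l.toList) rest with _ | b <;>
             simp [hA, hB] <;> omega)

theorem head?_filter_range (p : String → Bool) (lines : List String) :
    (((List.range lines.length).filter (fun k => p (lines.getD k ""))).head?) =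
      lines.findIdx? p := by
  induction lines with
  | nil => simp
  | cons l rest ih =>
    rw [List.length_cons, List.range_succ_eq_map, List.filter_cons]
    by_cases hp : p l
    · simp [hp, List.findIdx?_cons]
    · simp only [List.getD_cons_zero, hp, Bool.false_eq_true, if_false, List.findIdx?_cons]
      rw [List.filter_map, List.head?_map]
      have h2 : (List.range rest.length).filter ((fun k => p ((l :: rest).getD k "")) ∘ Nat.succ) =
          (List.range rest.length).filter (fun k => p (rest.getD k "")) := by
        apply List.filter_congr; intro k _; rfl
      rw [h2, ih]

theorem pyfilter_head (p : String → Bool) (lines : List String) :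
    ((PySem.List.pyRange 0 (PySem.List.len lines) 1).filter
        (fun x => p (PySem.List.pyGetD lines x ""))).head? =
      (lines.findIdx? p).map (fun j => (j : Int)) := by
  rw [PySem.List.pyRange_one]
  have hn : ((PySem.List.len lines : Int) - 0).toNat = lines.length := by
    simp [PySem.List.len]
  rw [hn, List.filter_map, List.head?_map]
  have h2 : (List.range lines.length).filter ((fun x => p (PySem.List.pyGetD lines x "")) ∘ (fun k : Nat => (0 : Int) + k)) =
      (List.range lines.length).filter (fun k => p (lines.getD k "")) := by
    apply List.filter_congr; intro k _
    simp [PySem.List.pyGetD_natCast]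
  rw [h2, head?_filter_range]
  cases lines.findIdx? p <;> simp

theorem combine (sl el : List Int) (oa ob : Option Nat)
    (h1 : sl.head? = oa.map (fun j => (j : Int)))
    (h2 : el.head? = ob.map (fun j => (j : Int))) :
    (if !sl.isEmpty && !el.isEmpty then (PySem.List.pyGetD sl 0 0, PySem.List.pyGetD el 0 0) else ((-1 : Int), (-1 : Int))) =
      (match oa.map (fun j => (0 : Int) + (j : Int)), ob.map (fun j => (0 : Int) + (j : Int)) with
        | some a, some b => (a, b)
        | _, _ => ((-1 : Int), (-1 : Int))) := by
  cases oa <;> cases ob <;> simp at h1 h2 ⊢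
  case none.none => exact fun h => absurd h1 h
  case none.some => exact fun h => absurd h1 h
  case some.none => exact fun _ h => absurd h2 h
  case some.some a b =>
    cases sl with
    | nil => simp at h1
    | cons x t =>
      cases el with
      | nil => simp at h2
      | cons y u =>
        simp only [List.head?_cons, Option.some.injEq] at h1 h2
        subst h1; subst h2
        rw [if_pos (by simp)]
        simp [PySem.List.pyGetD, PySem.List.pyGet?, PySem.List.pyIdx?]

theorem main_eq (marker_name content : String) :
    extract_marker_indexes marker_name content = extract_marker_indexes_alt marker_name content := by
  unfold extract_marker_indexes extract_marker_indexes_alt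
  rw [emiLoop_eq _ _ _ 0 (by omega)]
  have hneg : ¬ (0 : Int) ≤ -1 := by omega
  simp only [hneg, if_false]
  exact combine _ _ _ _ (pyfilter_head _ _) (pyfilter_head _ _)

-- ===== VERDICT (by name: the statement is the Claim_ definition above) =====
theorem extract_marker_indexes_spec : Claim_equal_extract_marker_indexes := by
  intro marker_name content _
  exact main_eq marker_name content
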